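-- pv_equiv track=rewrite | github.com/CDog5/CSUtils | csutils/data/misc.py | owoify
-- ===== SOURCE A (Python) =====
-- def keepcase(string):
--     out=[]
--     lowers= "abcdefghijklmnopqrstuvwxyz"
--     for i,char in enumerate(string):
--         if char in lowers:
--             out.append((i,False))
--         elif char in lowers.upper():
--             out.append((i,True))
--         else:
--             out.append((i,None))
--     return out
--
-- def owoify(mystr):
--     cases = keepcase(mystr)
--     mystr = mystr.lower()
--     replacers = [["r", "w"],["l", "w"],
--     ["no", "nu"],["has", "haz"],["have", "haz"],
--     ["you", "uu"],["the ", "da "]]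
--     for repl in replacers:
--         mystr = mystr.replace(repl[0],repl[1])
--     newstr=""
--     for k in cases:
--         if k[0] < len(mystr):
--             if k[1] == True:
--                 newstr += mystr[k[0]].upper()
--             elif k[1] == False:
--                 newstr += mystr[k[0]].lower()
--             else:
--                 newstr += mystr[k[0]]
--     return newstr
-- ===== SOURCE B (Python) =====
-- LOWERS = "abcdefghijklmnopqrstuvwxyz"
-- UPPERS = "ABCDEFGHIJKLMNOPQRSTUVWXYZ"
-- PATS = (("r", "w"), ("l", "w"), ("no", "nu"), ("has", "haz"),
--         ("have", "haz"), ("you", "uu"), ("the ", "da "))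
--
--
-- def owoify(mystr):
--     # single left-to-right pass: at each position substitute the first
--     # matching pattern (no intermediate replaced strings, no case table);
--     # each emitted character takes its case from the original character
--     # at the same output position.
--     low = mystr.lower()
--     out = []
--     i = 0
--     while i < len(low):
--         for p, r in PATS:
--             if low.startswith(p, i):
--                 i += len(p)
--                 break
--         else:
--             r = low[i]
--             i += 1
--         for ch in r:
--             o = mystr[len(out)]
--             if o in LOWERS:
--                 out.append(ch.lower())
--             elif o in UPPERS:
--                 out.append(ch.upper())
--             else:
--                 out.append(ch)
--     return "".join(out)
-- ===== Notes on version B (the rewrite author's own statement) =====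
-- stated objective: alternative
-- what changed: B replaces A's seven sequential full-string str.replace passes plus the keepcase (index,flag) table by a single left-to-right scan that substitutes the first matching pattern at each position and re-cases each emitted character from the original string as it goes.
import Mathlib
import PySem

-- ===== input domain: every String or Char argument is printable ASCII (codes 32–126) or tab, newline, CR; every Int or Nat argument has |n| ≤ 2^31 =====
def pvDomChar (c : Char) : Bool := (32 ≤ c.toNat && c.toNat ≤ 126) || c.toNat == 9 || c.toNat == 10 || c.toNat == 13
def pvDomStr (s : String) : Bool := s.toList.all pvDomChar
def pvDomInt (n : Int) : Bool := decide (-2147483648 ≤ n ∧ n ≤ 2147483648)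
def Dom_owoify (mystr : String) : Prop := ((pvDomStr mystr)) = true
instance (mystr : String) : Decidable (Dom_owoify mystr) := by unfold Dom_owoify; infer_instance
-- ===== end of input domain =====

-- B replaces A's seven str.replace passes + keepcase index table by ONE left-to-right
-- scan substituting the first matching pattern and re-casing as it emits (objective: alternative).


-- ===== PORT A =====
def pvLowers : List Char := "abcdefghijklmnopqrstuvwxyz".toList

-- helper keepcase: the (index, flag) list (False = lower, True = upper, None = other)
def pvKeepcase (string : List Char) : List (Int × Option Bool) :=
  (PySem.List.enumerate string).foldl
    (fun out p =>
      if pvLowers.contains p.2 then out ++ [(p.1, some false)]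
      else if (PySem.Chars.upper pvLowers).contains p.2 then out ++ [(p.1, some true)]
      else out ++ [(p.1, (none : Option Bool))])
    []

def pvReplacers : List (List Char × List Char) :=
  [("r".toList, "w".toList), ("l".toList, "w".toList),
   ("no".toList, "nu".toList), ("has".toList, "haz".toList), ("have".toList, "haz".toList),
   ("you".toList, "uu".toList), ("the ".toList, "da ".toList)]

def owoify (mystr : String) : String :=
  let cases := pvKeepcase mystr.toList
  let m := PySem.Chars.lower mystr.toList
  let m := pvReplacers.foldl (fun s r => PySem.Chars.replace s r.1 r.2) m
  let newstr := cases.foldl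
    (fun newstr k =>
      if k.1 < (m.length : Int) then
        -- mystr[k[0]]: in range by the guard (k.1 ≥ 0), so pyGetD is exact here
        if k.2 == some true then newstr ++ [PySem.Chars.upperChar (PySem.List.pyGetD m k.1 ' ')]
        else if k.2 == some false then newstr ++ [PySem.Chars.lowerChar (PySem.List.pyGetD m k.1 ' ')]
        else newstr ++ [PySem.List.pyGetD m k.1 ' ']
      else newstr)
    []
  String.ofList newstr

-- ===== PORT B =====
def pvUppersB : List Char := "ABCDEFGHIJKLMNOPQRSTUVWXYZ".toList

-- the per-character case fix of Source B's emit loop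
def pvFix (o t : Char) : Char :=
  if pvLowers.contains o then PySem.Chars.lowerChar t
  else if pvUppersB.contains o then PySem.Chars.upperChar t
  else t

def pvPats : List (List Char × List Char) :=
  [(['r'], ['w']), (['l'], ['w']), (['n','o'], ['n','u']), (['h','a','s'], ['h','a','z']),
   (['h','a','v','e'], ['h','a','z']), (['y','o','u'], ['u','u']), (['t','h','e',' '], ['d','a',' '])]

-- Source B's for/else over PATS: the first pattern that low startswith at the current position
def pvFirstMatch : List (List Char × List Char) → List Char → Option (List Char × List Char)
  | [], _ => none
  | (p, r) :: ps, t => if p.isPrefixOf t then some (p, r) else pvFirstMatch ps t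

-- termination helper for the scan below (matched pattern is one of pvPats, all nonempty)
theorem pvFirstMatch_mem : ∀ (ps : List (List Char × List Char)) (t : List Char)
    (x : List Char × List Char), pvFirstMatch ps t = some x → x ∈ ps := by
  intro ps
  induction ps with
  | nil => intro t x h; simp [pvFirstMatch] at h
  | cons a as ih =>
    intro t x h
    obtain ⟨p, r⟩ := a
    rw [pvFirstMatch] at h
    split at h
    · simp at h; simp [h]
    · exact List.mem_cons_of_mem _ (ih t x h)

-- Source B's inner emit loop: consume one original char per emitted char, fixing its case
def pvEmit : List Char → List Char → List Char × List Char
  | [], cs => ([], cs)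
  | ch :: rest, cs =>
    -- mystr[len(out)]: in range on every call the scan makes, so pyGetD is exact here
    let o := PySem.List.pyGetD cs 0 ' '
    let er := pvEmit rest (cs.drop 1)
    (pvFix o ch :: er.1, er.2)

-- Source B's while loop: low is the remaining lowered input, csrc the original chars not yet re-cased
def pvScanB (low csrc : List Char) : List Char :=
  match low with
  | [] => []
  | c :: t =>
    match hm : pvFirstMatch pvPats (c :: t) with
    | some (p, r) =>
      let er := pvEmit r csrc
      er.1 ++ pvScanB ((c :: t).drop p.length) er.2
    | none =>
      let er := pvEmit [c] csrc
      er.1 ++ pvScanB t er.2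
termination_by low.length
decreasing_by
  · have hmem := pvFirstMatch_mem _ _ _ hm
    have hlen : 1 ≤ p.length := by
      have hall : ∀ x ∈ pvPats, 1 ≤ x.1.length := by decide
      exact hall _ hmem
    simp [List.length_drop]; omega
  · simp

def owoify_alt (mystr : String) : String :=
  String.ofList (pvScanB (PySem.Chars.lower mystr.toList) mystr.toList)

-- ===== PRECONDITION & SPEC =====
def Spec_owoify (mystr : String) (out : String) : Prop := out = owoify_alt mystr
instance (mystr : String) (out : String) : Decidable (Spec_owoify mystr out) := by unfold Spec_owoify; infer_instance

-- ===== CLAIM (what is proved, stated in full; the proofs are below) =====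
def Claim_equal_owoify : Prop := ∀ (mystr : String), Dom_owoify mystr → Spec_owoify mystr (owoify mystr)

-- ===== LEMMAS AND PROOFS =====

-- ---------- A-side: A's output is the zip of the original with the replaced string ----------

-- A's per-character flag
def pvFlag (c : Char) : Option Bool :=
  if pvLowers.contains c then some false
  else if (PySem.Chars.upper pvLowers).contains c then some true
  else none

theorem pvUppers_eq : PySem.Chars.upper pvLowers = pvUppersB := by decide

theorem pvKeepcase_eq_map (s : List Char) :
    pvKeepcase s = (PySem.List.enumerate s).map (fun p => (p.1, pvFlag p.2)) := by
  unfold pvKeepcase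
  have : ∀ (l : List (Int × Char)) (acc : List (Int × Option Bool)),
      l.foldl
        (fun out p =>
          if pvLowers.contains p.2 then out ++ [(p.1, some false)]
          else if (PySem.Chars.upper pvLowers).contains p.2 then out ++ [(p.1, some true)]
          else out ++ [(p.1, (none : Option Bool))])
        acc
      = acc ++ l.map (fun p => (p.1, pvFlag p.2)) := by
    intro l
    induction l with
    | nil => simp
    | cons x xs ih =>
      intro acc
      simp only [List.foldl_cons, List.map_cons]
      rw [ih]
      unfold pvFlag
      split_ifs <;> simp
  simpa using this (PySem.List.enumerate s) []

-- A's branch on the flag equals the branch on the original char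
theorem pvBranch_eq (o t : Char) (t' : List Char) :
    (if pvFlag o == some true then t' ++ [PySem.Chars.upperChar t]
     else if pvFlag o == some false then t' ++ [PySem.Chars.lowerChar t]
     else t' ++ [t]) = t' ++ [pvFix o t] := by
  unfold pvFlag pvFix
  rw [pvUppers_eq]
  by_cases h1 : o ∈ pvLowers <;> by_cases h2 : o ∈ pvUppersB <;>
    simp [h1, h2]

-- the core loop lemma: A's indexed fold over the enumerate table is a zip-map
theorem pvLoop_eq (t : List Char) : ∀ (s : List Char) (i : Nat) (acc : List Char),
    ((PySem.List.enumerate s (i : Int)).map (fun p => (p.1, pvFlag p.2))).foldl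
      (fun newstr k =>
        if k.1 < (t.length : Int) then
          if k.2 == some true then newstr ++ [PySem.Chars.upperChar (PySem.List.pyGetD t k.1 ' ')]
          else if k.2 == some false then newstr ++ [PySem.Chars.lowerChar (PySem.List.pyGetD t k.1 ' ')]
          else newstr ++ [PySem.List.pyGetD t k.1 ' ']
        else newstr)
      acc
    = acc ++ (s.zip (t.drop i)).map (fun p => pvFix p.1 p.2) := by
  intro s
  induction s with
  | nil => intro i acc; simp [PySem.List.enumerate]
  | cons c s ih =>
    intro i acc
    rw [PySem.List.enumerate_cons]
    simp only [List.map_cons, List.foldl_cons]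
    have hcast : ((i : Int) + 1) = ((i + 1 : Nat) : Int) := by push_cast; ring
    rw [hcast, ih (i + 1)]
    by_cases h : i < t.length
    · have hlt : ((i : Int)) < (t.length : Int) := by exact_mod_cast h
      have hdrop : t.drop i = t[i] :: t.drop (i + 1) := List.drop_eq_getElem_cons h
      have hget : PySem.List.pyGetD t (i : Int) ' ' = t[i] := by
        rw [PySem.List.pyGetD_natCast]; exact List.getD_eq_getElem t ' ' h
      simp only [hlt, if_pos, hget, hdrop, List.zip_cons_cons, List.map_cons]
      rw [pvBranch_eq c t[i]]
      simp
    · have hge : ¬ ((i : Int) < (t.length : Int)) := by exact_mod_cast h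
      have hdrop : t.drop i = [] := List.drop_eq_nil_of_le (by omega)
      have hdrop' : t.drop (i + 1) = [] := List.drop_eq_nil_of_le (by omega)
      simp [hge, hdrop, hdrop']

-- ---------- the scanner and single-pattern replacer used by the equivalence argument ----------

-- one-pattern left-to-right replacer (what str.replace does)
def pvRepl (p r : List Char) : List Char → List Char
  | [] => []
  | c :: t =>
    if p.isPrefixOf (c :: t) then r ++ pvRepl p r ((c :: t).drop (p.length.max 1))
    else c :: pvRepl p r t
termination_by t => t.length
decreasing_by
  all_goals simp [List.length_drop]

-- the plain (case-free) first-match scanner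
def pvScanP (ps : List (List Char × List Char)) : List Char → List Char
  | [] => []
  | c :: t =>
    match pvFirstMatch ps (c :: t) with
    | some (p, r) => r ++ pvScanP ps ((c :: t).drop (p.length.max 1))
    | none => c :: pvScanP ps t
termination_by t => t.length
decreasing_by
  all_goals simp [List.length_drop]

theorem pvRepl_pos {p : List Char} (r : List Char) {c : Char} {t : List Char}
    (h : p <+: c :: t) :
    pvRepl p r (c :: t) = r ++ pvRepl p r ((c :: t).drop (p.length.max 1)) := by
  rw [pvRepl]; simp [List.isPrefixOf_iff_prefix, h]

theorem pvRepl_neg {p : List Char} (r : List Char) {c : Char} {t : List Char}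
    (h : ¬ p <+: c :: t) :
    pvRepl p r (c :: t) = c :: pvRepl p r t := by
  rw [pvRepl]; simp [List.isPrefixOf_iff_prefix, h]

theorem pvScanP_some {ps : List (List Char × List Char)} {t p r : List Char}
    (ht : t ≠ []) (h : pvFirstMatch ps t = some (p, r)) :
    pvScanP ps t = r ++ pvScanP ps (t.drop (p.length.max 1)) := by
  obtain ⟨c, t', rfl⟩ := List.exists_cons_of_ne_nil ht
  rw [pvScanP, h]

theorem pvScanP_none {ps : List (List Char × List Char)} {c : Char} {t : List Char}
    (h : pvFirstMatch ps (c :: t) = none) :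
    pvScanP ps (c :: t) = c :: pvScanP ps t := by
  rw [pvScanP, h]

theorem pvScanP_nil_pats (t : List Char) : pvScanP [] t = t := by
  induction t with
  | nil => rw [pvScanP]
  | cons c t ih => rw [pvScanP]; simp [pvFirstMatch, ih]

theorem pvFirstMatch_eq_none_iff (ps : List (List Char × List Char)) (t : List Char) :
    pvFirstMatch ps t = none ↔ ∀ x ∈ ps, ¬ x.1 <+: t := by
  induction ps with
  | nil => simp [pvFirstMatch]
  | cons a as ih =>
    obtain ⟨p, r⟩ := a
    rw [pvFirstMatch]
    by_cases h : p <+: t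
    · simp [List.isPrefixOf_iff_prefix, h]
    · simp [List.isPrefixOf_iff_prefix, h, ih]

theorem pvFirstMatch_some_prefix {ps : List (List Char × List Char)} {t : List Char}
    {x : List Char × List Char} (h : pvFirstMatch ps t = some x) : x.1 <+: t := by
  induction ps with
  | nil => simp [pvFirstMatch] at h
  | cons a as ih =>
    obtain ⟨p, r⟩ := a
    rw [pvFirstMatch] at h
    split at h
    · rename_i hp
      obtain rfl : (p, r) = x := by simpa using h
      simpa [List.isPrefixOf_iff_prefix] using hp
    · exact ih h

theorem prefix_split {u v w : List Char} (h : u <+: v ++ w) :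
    u <+: v ∨ v <+: u := by
  rcases Nat.lt_or_ge v.length u.length with hl | hl
  · exact Or.inr (List.prefix_of_prefix_length_le (List.prefix_append v w) h (by omega))
  · exact Or.inl ((List.isPrefix_append_of_length hl).mp h)

theorem scanP_passover (qs : List (List Char × List Char)) (r : List Char)
    (h1 : ∀ u ∈ r.tails, u ≠ [] → ∀ x ∈ qs, ¬ u <+: x.1 ∧ ¬ x.1 <+: u) :
    ∀ X, pvScanP qs (r ++ X) = r ++ pvScanP qs X := by
  induction r with
  | nil => simp
  | cons a r' ih =>
    intro X
    have hnone : pvFirstMatch qs (a :: (r' ++ X)) = none := by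
      rw [pvFirstMatch_eq_none_iff]
      intro x hx hc
      have hu := h1 (a :: r') (by simp [List.mem_tails]) (by simp) x hx
      rcases prefix_split (u := x.1) (v := a :: r') (w := X) (by simpa using hc) with h | h
      · exact hu.2 h
      · exact hu.1 h
    have hh : ∀ u ∈ r'.tails, u ≠ [] → ∀ x ∈ qs, ¬ u <+: x.1 ∧ ¬ x.1 <+: u := by
      intro u hu hne x hx
      exact h1 u (by rw [List.mem_tails] at hu ⊢; exact hu.trans (List.suffix_cons a r')) hne x hx
    simp only [List.cons_append]
    rw [pvScanP_none hnone, ih hh X]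

theorem repl_passover (p r q X : List Char)
    (h2 : ∀ u ∈ q.tails, u ≠ q → u ≠ [] → ¬ p <+: u ∧ ¬ u <+: p)
    (hnp : ¬ p <+: q ++ X) : pvRepl p r (q ++ X) = q ++ pvRepl p r X := by
  induction q with
  | nil => simp
  | cons a q' ih =>
    simp only [List.cons_append] at hnp ⊢
    rw [pvRepl_neg r hnp]
    by_cases hq' : q' = []
    · subst hq'; simp
    · have hnp' : ¬ p <+: q' ++ X := by
        intro hc
        have hu := h2 q' (by rw [List.mem_tails]; exact List.suffix_cons a q')
          (fun h => List.cons_ne_self a q' h.symm) hq'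
        rcases prefix_split hc with h | h
        · exact hu.1 h
        · exact hu.2 h
      have hh : ∀ u ∈ q'.tails, u ≠ q' → u ≠ [] → ¬ p <+: u ∧ ¬ u <+: p := by
        intro u hu hne hne2
        refine h2 u ?_ ?_ hne2
        · rw [List.mem_tails] at hu ⊢; exact hu.trans (List.suffix_cons a q')
        · intro h
          have hl := ((List.mem_tails _ _).mp hu).length_le
          rw [h] at hl
          simp at hl
      rw [ih hh hnp']

theorem repl_no_create (p r q : List Char)
    (h3 : ∀ u ∈ q.tails, u ≠ [] → ¬ u <+: r ∧ ¬ r <+: u) :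
    ∀ t, ∀ u ∈ q.tails, ¬ u <+: t → ¬ u <+: pvRepl p r t := by
  suffices H : ∀ n t, t.length ≤ n → ∀ u ∈ q.tails, ¬ u <+: t → ¬ u <+: pvRepl p r t by
    intro t; exact H t.length t le_rfl
  intro n
  induction n with
  | zero =>
    intro t ht u hu hnu
    have : t = [] := List.eq_nil_of_length_eq_zero (by omega)
    subst this
    rw [pvRepl]; exact hnu
  | succ n ih =>
    intro t ht u hu hnu
    cases t with
    | nil => rw [pvRepl]; exact hnu
    | cons c t' =>
      have hune : u ≠ [] := by rintro rfl; exact hnu (List.nil_prefix)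
      by_cases hpp : p <+: c :: t'
      · rw [pvRepl_pos r hpp]
        intro hc
        have hu3 := h3 u hu hune
        rcases prefix_split hc with h | h
        · exact hu3.1 h
        · exact hu3.2 h
      · rw [pvRepl_neg r hpp]
        obtain ⟨u0, u', rfl⟩ := List.exists_cons_of_ne_nil hune
        intro hc
        rw [List.cons_prefix_cons] at hc
        obtain ⟨rfl, hc2⟩ := hc
        have hnu' : ¬ u' <+: t' := by
          intro h
          exact hnu (List.cons_prefix_cons.mpr ⟨rfl, h⟩)
        have hu' : u' ∈ q.tails := by
          rw [List.mem_tails] at hu ⊢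
          exact (List.tail_suffix (u0 :: u')).trans hu
        exact ih t' (by simpa using ht) u' hu' hnu' hc2

theorem pvFirstMatch_replaced (qs : List (List Char × List Char))
    (q rq : List Char) (Y Z : List Char)
    (h4 : List.Pairwise (fun a b => b.1.length < a.1.length → ¬ b.1 <+: a.1) qs)
    (hm : pvFirstMatch qs (q ++ Y) = some (q, rq)) :
    pvFirstMatch qs (q ++ Z) = some (q, rq) := by
  induction qs with
  | nil => simp [pvFirstMatch] at hm
  | cons a as ih =>
    obtain ⟨p, r⟩ := a
    rw [pvFirstMatch] at hm ⊢
    by_cases hp : p <+: q ++ Y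
    · rw [if_pos (by simpa [List.isPrefixOf_iff_prefix] using hp)] at hm
      obtain ⟨rfl, rfl⟩ : p = q ∧ r = rq := by simpa using hm
      rw [if_pos (by simp [List.isPrefixOf_iff_prefix])]
    · rw [if_neg (by simpa [List.isPrefixOf_iff_prefix] using hp)] at hm
      have hmem : (q, rq) ∈ as := pvFirstMatch_mem _ _ _ hm
      have hnp : ¬ p <+: q ++ Z := by
        intro hc
        rcases prefix_split hc with h | h
        · exact hp (h.trans (List.prefix_append q Y))
        · rcases Nat.lt_or_ge q.length p.length with hl | hl
          · exact (List.rel_of_pairwise_cons h4 hmem) hl h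
          · have heq : q = p := List.IsPrefix.eq_of_length_le h (by omega)
            subst heq
            exact hp (List.prefix_append q Y)
      rw [if_neg (by simpa [List.isPrefixOf_iff_prefix] using hnp)]
      exact ih (List.Pairwise.of_cons h4) hm

theorem peel (p r : List Char) (qs : List (List Char × List Char))
    (hp : p ≠ []) (hqs : ∀ x ∈ qs, x.1 ≠ [])
    (h1 : ∀ u ∈ r.tails, u ≠ [] → ∀ x ∈ qs, ¬ u <+: x.1 ∧ ¬ x.1 <+: u)
    (h2 : ∀ x ∈ qs, ∀ u ∈ x.1.tails, u ≠ x.1 → u ≠ [] → ¬ p <+: u ∧ ¬ u <+: p)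
    (h3 : ∀ x ∈ qs, ∀ u ∈ x.1.tails, u ≠ [] → ¬ u <+: r ∧ ¬ r <+: u)
    (h4 : List.Pairwise (fun a b => b.1.length < a.1.length → ¬ b.1 <+: a.1) qs) :
    ∀ t, pvScanP ((p, r) :: qs) t = pvScanP qs (pvRepl p r t) := by
  have hp1 : p.length.max 1 = p.length := Nat.max_eq_left (List.length_pos_of_ne_nil hp)
  suffices H : ∀ n t, t.length ≤ n → pvScanP ((p, r) :: qs) t = pvScanP qs (pvRepl p r t) by
    intro t; exact H t.length t le_rfl
  intro n
  induction n with
  | zero =>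
    intro t ht
    have : t = [] := List.eq_nil_of_length_eq_zero (by omega)
    subst this
    rw [pvScanP, pvRepl, pvScanP]
  | succ n ih =>
    intro t ht
    cases t with
    | nil => rw [pvScanP, pvRepl, pvScanP]
    | cons c t' =>
      by_cases hpp : p <+: c :: t'
      · have hfm : pvFirstMatch ((p, r) :: qs) (c :: t') = some (p, r) := by
          rw [pvFirstMatch, if_pos (by simpa [List.isPrefixOf_iff_prefix] using hpp)]
        rw [pvScanP_some (by simp) hfm, pvRepl_pos r hpp,
          scanP_passover qs r h1]
        congr 1
        refine ih _ ?_
        have := List.length_pos_of_ne_nil hp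
        rw [hp1]
        simp only [List.length_drop, List.length_cons]
        simp only [List.length_cons] at ht
        omega
      · have hfm : pvFirstMatch ((p, r) :: qs) (c :: t') = pvFirstMatch qs (c :: t') := by
          rw [pvFirstMatch, if_neg (by simpa [List.isPrefixOf_iff_prefix] using hpp)]
        cases hm : pvFirstMatch qs (c :: t') with
        | none =>
          rw [pvScanP_none (hfm.trans hm), pvRepl_neg r hpp]
          have hnone2 : pvFirstMatch qs (c :: pvRepl p r t') = none := by
            rw [pvFirstMatch_eq_none_iff] at hm ⊢
            intro x hx hc
            have := repl_no_create p r x.1 (h3 x hx) (c :: t') x.1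
              (by rw [List.mem_tails]) (hm x hx)
            rw [pvRepl_neg r hpp] at this
            exact this hc
          rw [pvScanP_none hnone2]
          congr 1
          exact ih t' (by simpa using ht)
        | some x =>
          obtain ⟨q, rq⟩ := x
          have hqmem : (q, rq) ∈ qs := pvFirstMatch_mem _ _ _ hm
          have hqpre : q <+: c :: t' := pvFirstMatch_some_prefix hm
          have hqne : q ≠ [] := hqs _ hqmem
          have hq1 : q.length.max 1 = q.length := Nat.max_eq_left (List.length_pos_of_ne_nil hqne)
          have hsplit : q ++ (c :: t').drop q.length = c :: t' := (List.prefix_append_drop hqpre).symm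
          set X := (c :: t').drop q.length with hX
          have hrepl : pvRepl p r (c :: t') = q ++ pvRepl p r X := by
            rw [← hsplit]
            exact repl_passover p r q X (h2 _ hqmem) (by rw [hsplit]; exact hpp)
          have hm2 : pvFirstMatch qs (q ++ pvRepl p r X) = some (q, rq) :=
            pvFirstMatch_replaced qs q rq X (pvRepl p r X) h4 (by rw [hsplit]; exact hm)
          rw [pvScanP_some (by simp) (hfm.trans hm), hrepl,
            pvScanP_some (by simp [hqne]) hm2, hq1, List.drop_left]
          congr 1
          refine ih X ?_
          have := List.length_pos_of_ne_nil hqne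
          rw [hX]
          simp only [List.length_drop, List.length_cons]
          simp only [List.length_cons] at ht
          omega

theorem chain_eq (t : List Char) :
    pvScanP pvPats t =
      pvRepl "the ".toList "da ".toList (pvRepl "you".toList "uu".toList
        (pvRepl "have".toList "haz".toList (pvRepl "has".toList "haz".toList
          (pvRepl "no".toList "nu".toList (pvRepl "l".toList "w".toList
            (pvRepl "r".toList "w".toList t)))))) := by
  show pvScanP ((['r'],['w']) :: [(['l'], ['w']), (['n','o'], ['n','u']), (['h','a','s'], ['h','a','z']),
   (['h','a','v','e'], ['h','a','z']), (['y','o','u'], ['u','u']), (['t','h','e',' '], ['d','a',' '])]) t = _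
  rw [peel ['r'] ['w'] _ (by decide) (by decide) (by decide) (by decide) (by decide) (by decide),
      peel ['l'] ['w'] _ (by decide) (by decide) (by decide) (by decide) (by decide) (by decide),
      peel ['n','o'] ['n','u'] _ (by decide) (by decide) (by decide) (by decide) (by decide) (by decide),
      peel ['h','a','s'] ['h','a','z'] _ (by decide) (by decide) (by decide) (by decide) (by decide) (by decide),
      peel ['h','a','v','e'] ['h','a','z'] _ (by decide) (by decide) (by decide) (by decide) (by decide) (by decide),
      peel ['y','o','u'] ['u','u'] _ (by decide) (by decide) (by decide) (by decide) (by decide) (by decide),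
      peel ['t','h','e',' '] ['d','a',' '] _ (by decide) (by decide) (by decide) (by decide) (by decide) (by decide),
      pvScanP_nil_pats]
  rfl

theorem go_eq (old new : List Char) (hp : old ≠ []) : ∀ (fuel : Nat) (l acc : List Char),
    l.length ≤ fuel →
    PySem.Chars.replace.go old new fuel l acc = acc.reverse ++ pvRepl old new l := by
  have hm : old.length.max 1 = old.length := Nat.max_eq_left (List.length_pos_of_ne_nil hp)
  intro fuel
  induction fuel with
  | zero =>
    intro l acc h
    have : l = [] := List.eq_nil_of_length_eq_zero (by omega)
    subst this
    simp [PySem.Chars.replace.go, pvRepl]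
  | succ n ih =>
    intro l acc h
    cases l with
    | nil => simp [PySem.Chars.replace.go, pvRepl]
    | cons c t =>
      by_cases hpp : old <+: c :: t
      · rw [show PySem.Chars.replace.go old new (n+1) (c :: t) acc =
            PySem.Chars.replace.go old new n ((c :: t).drop old.length) (new.reverse ++ acc) from by
          simp [PySem.Chars.replace.go, List.isPrefixOf_iff_prefix, hpp]]
        rw [ih _ _ (by
          simp only [List.length_drop, List.length_cons]
          simp only [List.length_cons] at h
          have := List.length_pos_of_ne_nil hp
          omega)]
        rw [pvRepl_pos new hpp, hm]
        simp
      · rw [show PySem.Chars.replace.go old new (n+1) (c :: t) acc =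
            PySem.Chars.replace.go old new n t (c :: acc) from by
          simp [PySem.Chars.replace.go, List.isPrefixOf_iff_prefix, hpp]]
        rw [ih _ _ (by simpa using h)]
        rw [pvRepl_neg new hpp]
        simp

theorem replace_eq_pvRepl (p r : List Char) (hp : p ≠ []) (s : List Char) :
    PySem.Chars.replace s p r = pvRepl p r s := by
  rw [PySem.Chars.replace, if_neg (by simpa [List.isEmpty_iff] using hp)]
  simpa using go_eq p r hp s.length s [] le_rfl

theorem pvEmit_eq (chars : List Char) : ∀ cs : List Char, chars.length ≤ cs.length →
    pvEmit chars cs = ((cs.zip chars).map (fun pr => pvFix pr.1 pr.2), cs.drop chars.length) := by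
  induction chars with
  | nil => intro cs h; simp [pvEmit]
  | cons ch rest ih =>
    intro cs h
    cases cs with
    | nil => simp at h
    | cons o cs' =>
      rw [pvEmit]
      simp only [List.length_cons] at h
      simp only [List.drop_succ_cons, List.drop_zero]
      rw [ih cs' (by omega)]
      simp [PySem.List.pyGetD]

theorem scanP_length (ps : List (List Char × List Char))
    (hr : ∀ x ∈ ps, x.2.length ≤ x.1.length) (hne : ∀ x ∈ ps, x.1 ≠ []) :
    ∀ t, (pvScanP ps t).length ≤ t.length := by
  suffices H : ∀ n t, t.length ≤ n → (pvScanP ps t).length ≤ t.length by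
    intro t; exact H t.length t le_rfl
  intro n
  induction n with
  | zero =>
    intro t ht
    have : t = [] := List.eq_nil_of_length_eq_zero (by omega)
    subst this
    rw [pvScanP]
  | succ n ih =>
    intro t ht
    cases t with
    | nil => rw [pvScanP]
    | cons c t' =>
      cases hm : pvFirstMatch ps (c :: t') with
      | none =>
        rw [pvScanP_none hm]
        simp only [List.length_cons]
        have := ih t' (by simpa using ht)
        omega
      | some x =>
        obtain ⟨p, r⟩ := x
        have hmem := pvFirstMatch_mem _ _ _ hm
        have hl : r.length ≤ p.length := by simpa using hr _ hmem
        have hppos : 1 ≤ p.length := List.length_pos_of_ne_nil (by simpa using hne _ hmem)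
        have hp1 : p.length.max 1 = p.length := Nat.max_eq_left hppos
        have hplen : p.length ≤ t'.length + 1 := by simpa using (pvFirstMatch_some_prefix hm).length_le
        have heq := pvScanP_some (ps := ps) (by simp) hm
        rw [hp1] at heq
        rw [heq]
        have hdl : ((c :: t').drop p.length).length = t'.length + 1 - p.length := by simp
        have hih := ih ((c :: t').drop p.length) (by
          rw [hdl]
          simp only [List.length_cons] at ht
          omega)
        rw [hdl] at hih
        simp only [List.length_append, List.length_cons]
        omega

theorem zip_take_self (r : List Char) : ∀ l : List Char, (l.take r.length).zip r = l.zip r := by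
  induction r with
  | nil => intro l; simp
  | cons a r ih =>
    intro l
    cases l with
    | nil => simp
    | cons b l' => simp [ih]

theorem pvScanB_some {c : Char} {t : List Char} {p r : List Char} (csrc : List Char)
    (hm : pvFirstMatch pvPats (c :: t) = some (p, r)) :
    pvScanB (c :: t) csrc =
      (pvEmit r csrc).1 ++ pvScanB ((c :: t).drop p.length) (pvEmit r csrc).2 := by
  rw [pvScanB]
  split
  · rename_i p' r' h'
    rw [hm] at h'
    obtain ⟨rfl, rfl⟩ : p = p' ∧ r = r' := by
      have := h'.symm
      simp at this
      exact ⟨this.1.symm, this.2.symm⟩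
    rfl
  · rename_i h'
    rw [hm] at h'
    cases h'

theorem pvScanB_none {c : Char} {t : List Char} (csrc : List Char)
    (hm : pvFirstMatch pvPats (c :: t) = none) :
    pvScanB (c :: t) csrc = (pvEmit [c] csrc).1 ++ pvScanB t (pvEmit [c] csrc).2 := by
  rw [pvScanB]
  split
  · rename_i p' r' h'
    rw [hm] at h'
    cases h'
  · rfl

theorem scanB_eq : ∀ (n : Nat) (t csrc : List Char), t.length ≤ n →
    (pvScanP pvPats t).length ≤ csrc.length →
    pvScanB t csrc = (csrc.zip (pvScanP pvPats t)).map (fun pr => pvFix pr.1 pr.2) := by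
  intro n
  induction n with
  | zero =>
    intro t csrc ht h
    have : t = [] := List.eq_nil_of_length_eq_zero (by omega)
    subst this
    rw [pvScanB, pvScanP]
    simp
  | succ n ih =>
    intro t csrc ht h
    cases t with
    | nil => rw [pvScanB, pvScanP]; simp
    | cons c t' =>
      cases hm : pvFirstMatch pvPats (c :: t') with
      | none =>
        rw [pvScanB_none csrc hm]
        rw [pvScanP_none hm] at h ⊢
        simp only [List.length_cons] at h
        cases csrc with
        | nil => simp at h
        | cons o cs' =>
          rw [pvEmit_eq [c] (o :: cs') (by simp)]
          simp only [List.zip_cons_cons, List.zip_nil_right, List.map_cons, List.map_nil,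
            List.length_cons, List.length_nil, List.drop_succ_cons, List.drop_zero,
            List.cons_append, List.nil_append]
          rw [ih t' cs' (by simpa using ht) (by simpa using h)]
      | some x =>
        obtain ⟨p, r⟩ := x
        have hmem := pvFirstMatch_mem _ _ _ hm
        have hp1 : p.length.max 1 = p.length := by
          have h1 : ∀ x ∈ pvPats, 1 ≤ x.1.length := by decide
          exact Nat.max_eq_left (by simpa using h1 _ hmem)
        have heq := pvScanP_some (ps := pvPats) (by simp) hm
        rw [hp1] at heq
        rw [pvScanB_some csrc hm]
        rw [heq] at h ⊢
        simp only [List.length_append] at h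
        have hrcs : r.length ≤ csrc.length := by omega
        rw [pvEmit_eq r csrc hrcs]
        have hzip : csrc.zip (r ++ pvScanP pvPats ((c :: t').drop p.length)) =
            (csrc.take r.length).zip r ++ (csrc.drop r.length).zip (pvScanP pvPats ((c :: t').drop p.length)) := by
          conv_lhs => rw [← List.take_append_drop r.length csrc]
          rw [List.zip_append (by simp [hrcs])]
        rw [hzip]
        simp only [List.map_append]
        congr 1
        · rw [zip_take_self]
        · refine ih _ _ ?_ ?_
          · have hpl : 1 ≤ p.length := by
              have h1 : ∀ x ∈ pvPats, 1 ≤ x.1.length := by decide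
              simpa using h1 _ hmem
            simp only [List.length_drop, List.length_cons]
            simp only [List.length_cons] at ht
            omega
          · simp only [List.length_drop]
            omega

-- ===== VERDICT (by name: the statement is the Claim_ definition above) =====
theorem owoify_spec : Claim_equal_owoify := by
  intro mystr _
  unfold Spec_owoify owoify owoify_alt
  simp only [pvKeepcase_eq_map]
  have hA := pvLoop_eq
    (pvReplacers.foldl (fun s r => PySem.Chars.replace s r.1 r.2)
      (PySem.Chars.lower mystr.toList))
    mystr.toList 0 []
  simp only [Nat.cast_zero, List.drop_zero, List.nil_append] at hA
  rw [hA]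
  have hlow : (PySem.Chars.lower mystr.toList).length = mystr.toList.length := by
    simp [PySem.Chars.lower]
  have hlen : (pvScanP pvPats (PySem.Chars.lower mystr.toList)).length ≤ mystr.toList.length := by
    calc (pvScanP pvPats (PySem.Chars.lower mystr.toList)).length
        ≤ (PySem.Chars.lower mystr.toList).length :=
          scanP_length pvPats (by decide) (by decide) _
      _ = mystr.toList.length := hlow
  rw [scanB_eq (PySem.Chars.lower mystr.toList).length _ _ le_rfl hlen]
  have hT : pvReplacers.foldl (fun s r => PySem.Chars.replace s r.1 r.2)
      (PySem.Chars.lower mystr.toList) = pvScanP pvPats (PySem.Chars.lower mystr.toList) := by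
    simp only [pvReplacers, List.foldl_cons, List.foldl_nil]
    rw [replace_eq_pvRepl "r".toList "w".toList (by decide),
        replace_eq_pvRepl "l".toList "w".toList (by decide),
        replace_eq_pvRepl "no".toList "nu".toList (by decide),
        replace_eq_pvRepl "has".toList "haz".toList (by decide),
        replace_eq_pvRepl "have".toList "haz".toList (by decide),
        replace_eq_pvRepl "you".toList "uu".toList (by decide),
        replace_eq_pvRepl "the ".toList "da ".toList (by decide)]
    rw [chain_eq]
  rw [hT]
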